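-- pv_equiv track=rewrite | github.com/teebuphilip/fo_test_harness | gap-analysis/pass0_gap_check.py | _filter_banned_features
-- ===== SOURCE A (Python) =====
-- from typing import Any, Dict, List, Optional, Tuple
--
-- def _filter_banned_features(features: List[str], banned_phrases: List[str]) -> List[str]:
--     if not features or not banned_phrases:
--         return features
--     lowered_banned = [b.lower() for b in banned_phrases]
--     filtered = []
--     for feature in features:
--         f_lower = feature.lower()
--         if any(b in f_lower for b in lowered_banned):
--             continue
--         filtered.append(feature)
--     return filtered
-- ===== SOURCE B (Python) =====
-- def _filter_banned_features(features, banned_phrases):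
--     remaining = [(f, f.lower()) for f in features]
--     for b in banned_phrases:
--         bl = b.lower()
--         remaining = [p for p in remaining if bl not in p[1]]
--     return [p[0] for p in remaining]
-- ===== Notes on version B (the rewrite author's own statement) =====
-- stated objective: alternative
-- what changed: B inverts the loop nesting: it pairs each feature with its lowercase once, then sequentially narrows that pair list with one filter pass per banned phrase (instead of scanning all phrases per feature), relying on the order of the substring tests not mattering.
import Mathlib
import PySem

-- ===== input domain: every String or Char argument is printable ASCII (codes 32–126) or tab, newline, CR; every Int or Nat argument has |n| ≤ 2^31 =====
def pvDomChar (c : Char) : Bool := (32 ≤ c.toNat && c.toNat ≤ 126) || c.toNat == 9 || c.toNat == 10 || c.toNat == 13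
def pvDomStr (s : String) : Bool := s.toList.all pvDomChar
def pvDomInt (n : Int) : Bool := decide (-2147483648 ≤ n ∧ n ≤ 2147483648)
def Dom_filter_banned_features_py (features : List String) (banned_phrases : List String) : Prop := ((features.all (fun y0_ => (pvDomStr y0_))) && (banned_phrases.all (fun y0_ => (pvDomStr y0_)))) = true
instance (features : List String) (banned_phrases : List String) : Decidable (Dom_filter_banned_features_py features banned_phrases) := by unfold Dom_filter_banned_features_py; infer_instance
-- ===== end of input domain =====

-- B replaces A's feature-outer/phrase-inner scan-and-append loop with a paired
-- (feature, lowercase) list narrowed by one filter pass per banned phrase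
-- (alternative decomposition); the return value is proved identical on all inputs.

-- ===== PORT A =====
def filter_banned_features_py (features : List String) (banned_phrases : List String) : List String :=
  if features = [] ∨ banned_phrases = [] then features
  else
    let lowered_banned := banned_phrases.map PySem.Str.lower
    features.foldl (fun filtered feature =>
      if lowered_banned.any (fun b => PySem.Str.isIn b (PySem.Str.lower feature)) then filtered
      else filtered ++ [feature]) []

-- ===== PORT B =====
def filter_banned_features_py_alt (features : List String) (banned_phrases : List String) : List String :=
  let remaining := features.map (fun f => (f, PySem.Str.lower f))
  (banned_phrases.foldl (fun remaining b =>
    let bl := PySem.Str.lower b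
    remaining.filter (fun p => !PySem.Str.isIn bl p.2)) remaining).map (fun p => p.1)

-- ===== PRECONDITION & SPEC =====
def Spec_filter_banned_features_py (features : List String) (banned_phrases : List String) (out : List String) : Prop := out = filter_banned_features_py_alt features banned_phrases
instance (features : List String) (banned_phrases : List String) (out : List String) : Decidable (Spec_filter_banned_features_py features banned_phrases out) := by unfold Spec_filter_banned_features_py; infer_instance

-- ===== CLAIM (what is proved, stated in full; the proofs are below) =====
def Claim_equal_filter_banned_features_py : Prop := ∀ (features : List String) (banned_phrases : List String), Dom_filter_banned_features_py features banned_phrases → Spec_filter_banned_features_py features banned_phrases (filter_banned_features_py features banned_phrases)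

-- ===== LEMMAS AND PROOFS =====

-- B's sequential narrowing is one filter by the conjunction of all the tests.
theorem foldl_filter_eq_filter_all (banned_phrases : List String) (l : List (String × String)) :
    banned_phrases.foldl (fun remaining b =>
        remaining.filter (fun p => !PySem.Str.isIn (PySem.Str.lower b) p.2)) l
      = l.filter (fun p => banned_phrases.all (fun b => !PySem.Str.isIn (PySem.Str.lower b) p.2)) := by
  induction banned_phrases generalizing l with
  | nil => simp
  | cons b bs ih =>
    simp only [List.foldl_cons, ih, List.filter_filter, List.all_cons]
    congr 1
    funext p
    exact Bool.and_comm _ _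

theorem alt_eq_filter_all (features banned_phrases : List String) :
    filter_banned_features_py_alt features banned_phrases
      = features.filter (fun f =>
          banned_phrases.all (fun b => !PySem.Str.isIn (PySem.Str.lower b) (PySem.Str.lower f))) := by
  unfold filter_banned_features_py_alt
  dsimp only
  rw [foldl_filter_eq_filter_all, List.filter_map, List.map_map]
  simp [Function.comp_def]

-- skip-on-any vs append-on-all-negated, as one if-identity
theorem ite_any_append (bs : List String) (acc : List String) (x : String) (p : String → Bool) :
    (if bs.any p then acc else acc ++ [x])
      = (if (bs.all fun b => !p b) then acc ++ [x] else acc) := by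
  rw [List.all_eq_not_any_not]
  simp only [Bool.not_not]
  cases bs.any p <;> simp

-- A's accumulate-survivors loop is the same filter.
theorem a_eq_filter_all (features banned_phrases : List String) :
    filter_banned_features_py features banned_phrases
      = features.filter (fun f =>
          banned_phrases.all (fun b => !PySem.Str.isIn (PySem.Str.lower b) (PySem.Str.lower f))) := by
  unfold filter_banned_features_py
  by_cases h : features = [] ∨ banned_phrases = []
  · rcases h with h | h <;> simp [h]
  · simp only [h, if_false]
    have hstep : (fun (filtered : List String) (feature : String) =>
        if (banned_phrases.map PySem.Str.lower).any (fun b => PySem.Str.isIn b (PySem.Str.lower feature)) then filtered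
        else filtered ++ [feature])
      = (fun filtered feature =>
        if (banned_phrases.all (fun b => !PySem.Str.isIn (PySem.Str.lower b) (PySem.Str.lower feature)) : Bool)
        then filtered ++ [feature] else filtered) := by
      funext filtered feature
      rw [List.any_map]
      exact ite_any_append banned_phrases filtered feature _
    rw [hstep, PySem.List.foldl_append_if_eq_filter]
    simp

-- ===== VERDICT (by name: the statement is the Claim_ definition above) =====
theorem filter_banned_features_py_spec : Claim_equal_filter_banned_features_py := by
  intro features banned_phrases _
  unfold Spec_filter_banned_features_py
  rw [a_eq_filter_all, alt_eq_filter_all]
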